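-- pv_equiv track=rewrite | github.com/lyubo-t/climate-forcing-model | src/main.py | common_array
-- ===== SOURCE A (Python) =====
-- def common_array(C,M,N):
--     array = []
--     for date in C[0]:
--         if date not in array:
--             array.append(date)
--     for date in M[0]:
--         if date not in array:
--             array.append(date)
--     for date in N[0]:
--         if date not in array:
--             array.append(date)
--     array.sort()
--     return array
-- ===== SOURCE B (Python) =====
-- def common_array(C, M, N):
--     combined = sorted(C[0] + M[0] + N[0])
--     result = []
--     for d in combined:
--         if not result or result[-1] != d:
--             result.append(d)
--     return result
-- ===== Notes on version B (the rewrite author's own statement) =====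
-- stated objective: alternative
-- what changed: Replaces per-element 'not in' membership scans followed by a sort with one sort of the concatenated list and a single linear adjacent-dedup pass.
import Mathlib
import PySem

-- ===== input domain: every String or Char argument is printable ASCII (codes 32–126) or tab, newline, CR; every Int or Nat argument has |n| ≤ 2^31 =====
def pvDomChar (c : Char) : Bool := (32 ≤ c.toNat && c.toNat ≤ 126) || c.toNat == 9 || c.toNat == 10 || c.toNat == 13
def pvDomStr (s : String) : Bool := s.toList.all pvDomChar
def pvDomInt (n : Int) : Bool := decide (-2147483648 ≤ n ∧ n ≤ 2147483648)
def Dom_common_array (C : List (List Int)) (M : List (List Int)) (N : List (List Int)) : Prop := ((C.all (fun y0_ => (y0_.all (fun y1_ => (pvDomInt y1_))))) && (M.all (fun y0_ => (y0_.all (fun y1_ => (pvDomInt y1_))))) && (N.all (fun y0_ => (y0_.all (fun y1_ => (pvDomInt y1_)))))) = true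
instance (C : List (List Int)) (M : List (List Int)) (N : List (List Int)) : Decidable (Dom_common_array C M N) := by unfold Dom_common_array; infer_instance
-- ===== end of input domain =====

-- B replaces A's membership-scan dedup (then sort) by one sort of the concatenation
-- followed by a linear adjacent-dedup pass (alternative algorithm, similar measured cost).

-- ===== PORT A =====
def common_array (C : List (List Int)) (M : List (List Int)) (N : List (List Int)) : List Int :=
  -- array = []; three 'for date in X[0]: if date not in array: array.append(date)' loops
  let a1 := (C.headD []).foldl (fun arr d => if d ∈ arr then arr else arr ++ [d]) []
  let a2 := (M.headD []).foldl (fun arr d => if d ∈ arr then arr else arr ++ [d]) a1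
  let a3 := (N.headD []).foldl (fun arr d => if d ∈ arr then arr else arr ++ [d]) a2
  PySem.List.sorted a3 (fun x => x) false

-- ===== PORT B =====
def common_array_alt (C : List (List Int)) (M : List (List Int)) (N : List (List Int)) : List Int :=
  -- combined = sorted(C[0] + M[0] + N[0]); append d unless result[-1] == d
  let combined := PySem.List.sorted (C.headD [] ++ M.headD [] ++ N.headD []) (fun x => x) false
  combined.foldl (fun res d => if res.getLast? = some d then res else res ++ [d]) []

-- ===== PRECONDITION & SPEC =====
-- Pre_ excludes exactly the inputs where Python A raises IndexError (C[0]/M[0]/N[0] on an empty list).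
def Pre_common_array (C : List (List Int)) (M : List (List Int)) (N : List (List Int)) : Prop :=
  C ≠ [] ∧ M ≠ [] ∧ N ≠ []
instance (C : List (List Int)) (M : List (List Int)) (N : List (List Int)) : Decidable (Pre_common_array C M N) := by unfold Pre_common_array; infer_instance
def pvWitness_common_array : List (List Int) × List (List Int) × List (List Int) :=
  ([[3, 1, 3]], [[2]], [[1, 4]])
def Spec_common_array (C : List (List Int)) (M : List (List Int)) (N : List (List Int)) (out : List Int) : Prop := out = common_array_alt C M N
instance (C : List (List Int)) (M : List (List Int)) (N : List (List Int)) (out : List Int) : Decidable (Spec_common_array C M N out) := by unfold Spec_common_array; infer_instance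

-- ===== CLAIM (what is proved, stated in full; the proofs are below) =====
def Claim_equal_common_array : Prop := ∀ (C : List (List Int)) (M : List (List Int)) (N : List (List Int)), Dom_common_array C M N → Pre_common_array C M N → Spec_common_array C M N (common_array C M N)

-- ===== LEMMAS AND PROOFS =====

-- A's dedup fold: keeps the accumulator duplicate-free, and the members are acc ∪ xs.
theorem pvA_fold (xs acc : List Int) (h : acc.Nodup) :
    (xs.foldl (fun arr d => if d ∈ arr then arr else arr ++ [d]) acc).Nodup ∧
    (∀ y, y ∈ xs.foldl (fun arr d => if d ∈ arr then arr else arr ++ [d]) acc ↔ y ∈ acc ∨ y ∈ xs) := by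
  induction xs generalizing acc with
  | nil => simpa using h
  | cons d xs ih =>
    simp only [List.foldl_cons]
    by_cases hd : d ∈ acc
    · simp only [if_pos hd]
      obtain ⟨h1, h2⟩ := ih acc h
      refine ⟨h1, fun y => ?_⟩
      rw [h2]
      constructor
      · rintro (hy | hy) <;> simp [hy]
      · rintro (hy | hy)
        · simp [hy]
        · rcases List.mem_cons.mp hy with rfl | hy'
          · simp [hd]
          · simp [hy']
    · simp only [if_neg hd]
      have hnd : (acc ++ [d]).Nodup := by
        refine List.Nodup.append h (by simp) ?_
        intro a ha hb
        simp at hb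
        subst hb
        exact hd ha
      obtain ⟨h1, h2⟩ := ih (acc ++ [d]) hnd
      refine ⟨h1, fun y => ?_⟩
      rw [h2]
      simp [or_assoc]

-- In a strictly increasing list every element is ≤ the last one.
theorem pvLe_getLast (l : List Int) (hp : l.Pairwise (· < ·)) (b : Int)
    (hl : l.getLast? = some b) : ∀ a ∈ l, a ≤ b := by
  induction l with
  | nil => simp at hl
  | cons x t ih =>
    rcases t with _ | ⟨y, t'⟩
    · simp at hl
      intro a ha
      simp at ha
      omega
    · rw [List.getLast?_cons_cons] at hl
      have hp' := List.pairwise_cons.mp hp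
      intro a ha
      rcases List.mem_cons.mp ha with rfl | ha'
      · have hy : b ∈ y :: t' := List.mem_of_getLast? hl
        exact le_of_lt (hp'.1 b hy)
      · exact ih hp'.2 hl a ha'

-- B's adjacent-dedup fold on a nondecreasing input: strictly increasing result, members = acc ∪ xs.
theorem pvB_fold (xs acc : List Int) (h1 : acc.Pairwise (· < ·)) (h2 : xs.Pairwise (· ≤ ·))
    (h3 : ∀ a ∈ acc, ∀ x ∈ xs, a ≤ x) :
    (xs.foldl (fun res d => if res.getLast? = some d then res else res ++ [d]) acc).Pairwise (· < ·) ∧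
    (∀ y, y ∈ xs.foldl (fun res d => if res.getLast? = some d then res else res ++ [d]) acc ↔ y ∈ acc ∨ y ∈ xs) := by
  induction xs generalizing acc with
  | nil => simpa using h1
  | cons d xs ih =>
    have h2' := List.pairwise_cons.mp h2
    simp only [List.foldl_cons]
    by_cases hd : acc.getLast? = some d
    · simp only [if_pos hd]
      have h3' : ∀ a ∈ acc, ∀ x ∈ xs, a ≤ x := fun a ha x hx => h3 a ha x (by simp [hx])
      obtain ⟨g1, g2⟩ := ih acc h1 h2'.2 h3'
      refine ⟨g1, fun y => ?_⟩
      rw [g2]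
      have hdm : d ∈ acc := List.mem_of_getLast? hd
      constructor
      · rintro (hy | hy) <;> simp [hy]
      · rintro (hy | hy)
        · simp [hy]
        · rcases List.mem_cons.mp hy with rfl | hy'
          · simp [hdm]
          · simp [hy']
    · simp only [if_neg hd]
      have hlt : ∀ a ∈ acc, a < d := by
        intro a ha
        rcases hacc : acc.getLast? with _ | b
        · rcases acc with _ | _
          · simp at ha
          · simp at hacc
        · have hab : a ≤ b := pvLe_getLast acc h1 b hacc a ha
          have hbd : b ≤ d := h3 b (List.mem_of_getLast? hacc) d (by simp)
          have : b ≠ d := fun hbd' => hd (by rw [hacc, hbd'])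
          omega
      have hnp : (acc ++ [d]).Pairwise (· < ·) := by
        rw [List.pairwise_append]
        exact ⟨h1, by simp, by simpa using hlt⟩
      have h3' : ∀ a ∈ acc ++ [d], ∀ x ∈ xs, a ≤ x := by
        intro a ha x hx
        rcases List.mem_append.mp ha with ha' | ha'
        · exact h3 a ha' x (by simp [hx])
        · simp at ha'
          subst ha'
          exact h2'.1 x hx
      obtain ⟨g1, g2⟩ := ih (acc ++ [d]) hnp h2'.2 h3'
      refine ⟨g1, fun y => ?_⟩
      rw [g2]
      simp [or_assoc]

-- ===== VERDICT (by name: the statement is the Claim_ definition above) =====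
theorem common_array_spec : Claim_equal_common_array := by
  intro C M N _ _
  unfold Spec_common_array common_array common_array_alt
  simp only
  set c := C.headD [] with hc
  set m := M.headD [] with hm
  set n := N.headD [] with hn
  -- A's three folds are one fold over the concatenation
  have hA : (n.foldl (fun arr d => if d ∈ arr then arr else arr ++ [d])
      (m.foldl (fun arr d => if d ∈ arr then arr else arr ++ [d])
      (c.foldl (fun arr d => if d ∈ arr then arr else arr ++ [d]) []))) =
      ((c ++ m ++ n).foldl (fun arr d => if d ∈ arr then arr else arr ++ [d]) []) := by
    simp [List.foldl_append]
  rw [hA]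
  obtain ⟨hAnd, hAmem⟩ := pvA_fold (c ++ m ++ n) [] (by simp)
  -- B's pass over the sorted concatenation
  have hsp : (PySem.List.sorted (c ++ m ++ n) (fun x => x) false).Pairwise (· ≤ ·) := by
    simpa using PySem.List.sorted_pairwise (xs := c ++ m ++ n) (key := fun x => x)
  obtain ⟨hBlt, hBmem⟩ := pvB_fold (PySem.List.sorted (c ++ m ++ n) (fun x => x) false) []
    (by simp) hsp (by simp)
  have hBmem' : ∀ y, y ∈ ((PySem.List.sorted (c ++ m ++ n) (fun x => x) false).foldl
      (fun res d => if res.getLast? = some d then res else res ++ [d]) []) ↔ y ∈ c ++ m ++ n := by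
    intro y
    rw [hBmem y]
    simp [PySem.List.mem_sorted]
  -- both are permutations of each other: nodup lists with the same members
  have hBnd : ((PySem.List.sorted (c ++ m ++ n) (fun x => x) false).foldl
      (fun res d => if res.getLast? = some d then res else res ++ [d]) []).Nodup :=
    hBlt.imp (fun h => ne_of_lt h)
  have hperm : ((PySem.List.sorted (c ++ m ++ n) (fun x => x) false).foldl
      (fun res d => if res.getLast? = some d then res else res ++ [d]) []).Perm
      ((c ++ m ++ n).foldl (fun arr d => if d ∈ arr then arr else arr ++ [d]) []) := by
    rw [List.perm_ext_iff_of_nodup hBnd hAnd]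
    intro y
    rw [hBmem' y, hAmem y]
    simp
  exact PySem.List.sorted_eq_of_perm_of_pairwise_lt _ _ _ hperm (by simpa using hBlt)
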